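-- pv_equiv track=rewrite | github.com/cytokineking/Protein-Hunter | modal_boltz_ph/validation/openfold3.py | convert_colabfold_msa_for_openfold3
-- ===== SOURCE A (Python) =====
-- def convert_colabfold_msa_for_openfold3(msa_content: str, query_sequence: str) -> str:
--     """
--     Convert ColabFold API MSA format to OpenFold3-compatible format.
--
--     ColabFold API returns MSAs with headers like:
--         >101
--         SEQUENCE...
--         >UniRef100_A0A0A0A0A0/1-100
--         SEQUENCE...
--
--     OpenFold3 expects:
--     1. Query sequence as the FIRST sequence in the MSA
--     2. Proper species-style headers for pairing: <str>|<str>|<str>|<species>|<str>|<str>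
--
--     Args:
--         msa_content: A3M content from ColabFold API
--         query_sequence: The actual query sequence for this chain
--
--     Returns:
--         A3M content with OpenFold3-compatible format
--     """
--     lines = msa_content.strip().split('\n')
--     converted_lines = []
--
--     # Parse existing MSA entries
--     entries = []
--     current_header = None
--     current_seq = []
--
--     for line in lines:
--         if line.startswith('>'):
--             if current_header is not None:
--                 entries.append((current_header, ''.join(current_seq)))
--             current_header = line
--             current_seq = []
--         else:
--             current_seq.append(line)
--
--     if current_header is not None:
--         entries.append((current_header, ''.join(current_seq)))
--
--     # Build output: query sequence first
--     # Use header format that OpenFold3 expects: >query for first sequence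
--     converted_lines.append('>query')
--     converted_lines.append(query_sequence)
--
--     # Add other sequences, converting headers to species format if needed
--     for header, seq in entries:
--         header_text = header[1:].strip()  # Remove '>'
--
--         # Skip the original query sequence (it was typically ">101" or just the sequence)
--         seq_clean = seq.replace('-', '').replace('.', '').upper()
--         if seq_clean == query_sequence.upper():
--             continue
--
--         # Skip if it's just a number header (original query)
--         if header_text.isdigit():
--             continue
--
--         # Convert UniRef/UniProt headers to species format
--         # e.g., >UniRef100_A0A0A0A0A0/1-100 -> >tr|A0A0A0A0A0|UNKNOWN|9606|1-100|FL=1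
--         if 'UniRef' in header_text or 'UniProt' in header_text or '|' in header_text:
--             # Try to extract species info, default to UNKNOWN
--             parts = header_text.replace('/', '|').split('|')
--             if len(parts) >= 2:
--                 accession = parts[1] if len(parts) > 1 else parts[0]
--                 # Use format: >db|accession|name|species|range|desc
--                 new_header = f">tr|{accession}|{accession}|9606|1-{len(seq_clean)}|FL=1"
--                 converted_lines.append(new_header)
--             else:
--                 converted_lines.append(header)
--         else:
--             converted_lines.append(header)
--
--         converted_lines.append(seq)
--
--     return '\n'.join(converted_lines)
-- ===== SOURCE B (Python) =====
-- def _convert_record(header, seq, query_upper):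
--     """Lines emitted for one record, [] if the record is filtered out."""
--     header_text = header[1:].strip()
--     seq_clean = seq.replace('-', '').replace('.', '').upper()
--     if seq_clean == query_upper or header_text.isdigit():
--         return []
--     if 'UniRef' in header_text or 'UniProt' in header_text or '|' in header_text:
--         parts = header_text.replace('/', '|').split('|')
--         if len(parts) >= 2:
--             return [f">tr|{parts[1]}|{parts[1]}|9606|1-{len(seq_clean)}|FL=1", seq]
--     return [header, seq]
--
--
-- def convert_colabfold_msa_for_openfold3(msa_content: str, query_sequence: str) -> str:
--     """Reverse traversal: walk the lines bottom-up, collecting the sequence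
--     lines that lie below the cursor; on reaching a header the record is
--     complete and is prepended to the output.  No current-header state
--     machine, no intermediate entries list, no end-of-input flush."""
--     query_upper = query_sequence.upper()
--     out = []
--     pending = []  # sequence lines below the cursor, nearest first
--     for line in reversed(msa_content.strip().split('\n')):
--         if line.startswith('>'):
--             out = _convert_record(line, ''.join(reversed(pending)), query_upper) + out
--             pending = []
--         else:
--             pending.append(line)
--     return '\n'.join(['>query', query_sequence] + out)
-- ===== Notes on version B (the rewrite author's own statement) =====
-- stated objective: alternative
-- what changed: Replaced A's forward state machine (current_header/current_seq accumulator building an intermediate entries list, plus an end-of-input flush, then a second conversion loop) with a single reverse traversal: lines are walked bottom-up with only a pending-sequence-lines accumulator, each record is complete the moment its header is reached and is converted and prepended to the output built back-to-front, so there is no header state, no entries list and no final flush.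
import Mathlib
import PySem

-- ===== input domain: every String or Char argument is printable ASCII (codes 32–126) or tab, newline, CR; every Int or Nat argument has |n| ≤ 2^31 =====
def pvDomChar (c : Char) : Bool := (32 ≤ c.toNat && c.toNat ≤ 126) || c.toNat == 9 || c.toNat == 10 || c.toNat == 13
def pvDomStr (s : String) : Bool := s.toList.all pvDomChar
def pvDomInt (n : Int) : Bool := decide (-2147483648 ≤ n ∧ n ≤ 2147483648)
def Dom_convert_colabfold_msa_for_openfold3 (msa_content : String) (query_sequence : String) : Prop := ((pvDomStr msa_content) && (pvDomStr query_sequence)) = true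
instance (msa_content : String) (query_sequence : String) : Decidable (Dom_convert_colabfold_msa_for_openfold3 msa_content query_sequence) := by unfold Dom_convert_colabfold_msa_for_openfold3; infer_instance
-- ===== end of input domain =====

-- B replaces A's forward header/sequence state machine with entries list and end-of-input flush
-- by one reverse (bottom-up) traversal that prepends each completed record to the output; same output (objective: alternative).


-- ===== PORT A =====
-- line.startswith('>') (the literal condition both Pythons test)
def pvHdr (l : String) : Bool := PySem.Str.startswith l ">"

-- flush of the pending (current_header, current_seq) into the entries list
def pvFlushA (h : Option String) (sacc : List String) : List (String × String) :=
  match h with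
  | some hd => [(hd, PySem.Str.join "" sacc)]
  | none => []

-- one step of A's parsing loop over the lines; state = (entries, current_header, current_seq)
def pvStepA (st : List (String × String) × Option String × List String) (line : String) :
    List (String × String) × Option String × List String :=
  if pvHdr line then (st.1 ++ pvFlushA st.2.1 st.2.2, some line, [])
  else (st.1, st.2.1, st.2.2 ++ [line])

-- the lines A's second loop appends for one entry (empty list = 'continue')
def pvConvA (qs hd seq : String) : List String :=
  let header_text := PySem.Str.strip (PySem.Str.slice hd (some 1) none)
  let seq_clean := PySem.Str.upper (PySem.Str.replace (PySem.Str.replace seq "-" "") "." "")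
  if seq_clean == PySem.Str.upper qs then []
  else if PySem.Str.strIsdigit header_text then []
  else
    (if PySem.Str.isIn "UniRef" header_text || PySem.Str.isIn "UniProt" header_text
        || PySem.Str.isIn "|" header_text then
      let parts := (PySem.Str.split? (PySem.Str.replace header_text "/" "|") "|").getD []
      if parts.length ≥ 2 then
        let accession := if parts.length > 1 then PySem.List.pyGetD parts 1 ""
                         else PySem.List.pyGetD parts 0 ""
        [">tr|" ++ accession ++ "|" ++ accession ++ "|9606|1-"
          ++ PySem.Int.toStr (PySem.Str.len seq_clean) ++ "|FL=1"]
      else [hd]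
    else [hd]) ++ [seq]

def convert_colabfold_msa_for_openfold3 (msa_content : String) (query_sequence : String) : String :=
  let lines := (PySem.Str.split? (PySem.Str.strip msa_content) "\n").getD []
  let st := lines.foldl pvStepA ([], none, [])
  let entries := st.1 ++ pvFlushA st.2.1 st.2.2
  let converted := entries.foldl
    (fun acc e => acc ++ pvConvA query_sequence e.1 e.2) [">query", query_sequence]
  PySem.Str.join "\n" converted

-- ===== PORT B =====
-- _convert_record: the lines B emits for one record ([] = filtered out)
def pvConvB (qU hd seq : String) : List String :=
  let header_text := PySem.Str.strip (PySem.Str.slice hd (some 1) none)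
  let seq_clean := PySem.Str.upper (PySem.Str.replace (PySem.Str.replace seq "-" "") "." "")
  if seq_clean == qU || PySem.Str.strIsdigit header_text then []
  else if PySem.Str.isIn "UniRef" header_text || PySem.Str.isIn "UniProt" header_text
      || PySem.Str.isIn "|" header_text then
    let parts := (PySem.Str.split? (PySem.Str.replace header_text "/" "|") "|").getD []
    if parts.length ≥ 2 then
      [">tr|" ++ PySem.List.pyGetD parts 1 "" ++ "|" ++ PySem.List.pyGetD parts 1 "" ++ "|9606|1-"
        ++ PySem.Int.toStr (PySem.Str.len seq_clean) ++ "|FL=1", seq]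
    else [hd, seq]
  else [hd, seq]

-- one step of B's loop over reversed(lines); state = (out, pending)
def pvStepB (qU : String) (st : List String × List String) (line : String) :
    List String × List String :=
  if pvHdr line then
    (pvConvB qU line (PySem.Str.join "" st.2.reverse) ++ st.1, [])
  else (st.1, st.2 ++ [line])

def convert_colabfold_msa_for_openfold3_alt (msa_content : String) (query_sequence : String) : String :=
  let lines := (PySem.Str.split? (PySem.Str.strip msa_content) "\n").getD []
  let st := lines.reverse.foldl (pvStepB (PySem.Str.upper query_sequence)) ([], [])
  PySem.Str.join "\n" ([">query", query_sequence] ++ st.1)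

-- ===== PRECONDITION & SPEC =====
def Spec_convert_colabfold_msa_for_openfold3 (msa_content : String) (query_sequence : String) (out : String) : Prop := out = convert_colabfold_msa_for_openfold3_alt msa_content query_sequence
instance (msa_content : String) (query_sequence : String) (out : String) : Decidable (Spec_convert_colabfold_msa_for_openfold3 msa_content query_sequence out) := by unfold Spec_convert_colabfold_msa_for_openfold3; infer_instance

-- ===== CLAIM (what is proved, stated in full; the proofs are below) =====
def Claim_equal_convert_colabfold_msa_for_openfold3 : Prop := ∀ (msa_content : String) (query_sequence : String), Dom_convert_colabfold_msa_for_openfold3 msa_content query_sequence → Spec_convert_colabfold_msa_for_openfold3 msa_content query_sequence (convert_colabfold_msa_for_openfold3 msa_content query_sequence)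

-- ===== LEMMAS AND PROOFS =====

-- the entry list A's first loop produces, written as a structural recursion over the lines
def pvEntriesOf (h : Option String) (sacc : List String) : List String → List (String × String)
  | [] => pvFlushA h sacc
  | l :: ls =>
    if pvHdr l then pvFlushA h sacc ++ pvEntriesOf (some l) [] ls
    else pvEntriesOf h (sacc ++ [l]) ls

theorem pvFoldA_eq (ls : List String) : ∀ (es : List (String × String)) (h : Option String) (sacc : List String),
    (ls.foldl pvStepA (es, h, sacc)).1
      ++ pvFlushA (ls.foldl pvStepA (es, h, sacc)).2.1 (ls.foldl pvStepA (es, h, sacc)).2.2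
    = es ++ pvEntriesOf h sacc ls := by
  induction ls with
  | nil => intro es h sacc; simp [pvEntriesOf]
  | cons l ls ih =>
    intro es h sacc
    simp only [List.foldl_cons, pvEntriesOf, pvStepA]
    split
    · rw [ih]; simp [pvFlushA]
    · rw [ih]

theorem pvEntriesOf_none (ls : List String) : ∀ sacc, pvEntriesOf none sacc ls = pvEntriesOf none [] ls := by
  induction ls with
  | nil => intro sacc; simp [pvEntriesOf, pvFlushA]
  | cons l ls ih =>
    intro sacc
    simp only [pvEntriesOf, pvFlushA]
    split
    · rfl
    · rw [ih (sacc ++ [l]), ih ([] ++ [l])]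

theorem pvEntriesOf_some (ls : List String) : ∀ (hd : String) (sacc : List String),
    pvEntriesOf (some hd) sacc ls
      = (hd, PySem.Str.join "" (sacc ++ ls.takeWhile (fun l => !pvHdr l)))
          :: pvEntriesOf none [] (ls.dropWhile (fun l => !pvHdr l)) := by
  induction ls with
  | nil => intro hd sacc; simp [pvEntriesOf, pvFlushA]
  | cons l ls ih =>
    intro hd sacc
    by_cases h : pvHdr l
    · simp [pvEntriesOf, pvFlushA, h]
    · simp only [pvEntriesOf, List.takeWhile_cons, List.dropWhile_cons,
        h, Bool.not_false]
      rw [ih hd (sacc ++ [l])]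
      simp

-- dropping a header-free prefix does not change the entry list
theorem pvEntriesOf_dropWhile (ls : List String) :
    pvEntriesOf none [] ls = pvEntriesOf none [] (ls.dropWhile (fun l => !pvHdr l)) := by
  induction ls with
  | nil => rfl
  | cons l ls ih =>
    by_cases h : pvHdr l
    · simp [h]
    · simp only [pvEntriesOf, List.dropWhile_cons, h, Bool.not_false]
      rw [pvEntriesOf_none ls ([] ++ [l])]
      exact ih

-- filters of A and B compute the same record lines
theorem pvConvAB (qs hd seq : String) : pvConvA qs hd seq = pvConvB (PySem.Str.upper qs) hd seq := by
  simp only [pvConvA, pvConvB]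
  by_cases h1 : (PySem.Str.upper (PySem.Str.replace (PySem.Str.replace seq "-" "") "." "")
      == PySem.Str.upper qs) = true
  · simp [h1]
  · by_cases h2 : PySem.Chars.strIsdigit (PySem.Chars.strip (PySem.List.slice hd.toList (some 1))) = true
    · simp [h1, h2]
    · by_cases h3 : 2 ≤ ((PySem.Str.split? (PySem.Str.replace
          (PySem.Str.strip (PySem.Str.slice hd (some 1) none)) "/" "|") "|").getD []).length
      · simp [h1, h2, h3, Nat.lt_of_lt_of_le Nat.one_lt_two h3]
        split <;> rfl
      · simp [h1, h2, h3]

-- invariant of B's reverse loop: out = converted entries of the suffix, pending = its header-free prefix reversed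
theorem pvFoldB_eq (qU : String) (ls : List String) :
    ls.reverse.foldl (pvStepB qU) ([], [])
      = ((pvEntriesOf none [] ls).flatMap (fun e => pvConvB qU e.1 e.2),
         (ls.takeWhile (fun l => !pvHdr l)).reverse) := by
  rw [List.foldl_reverse]
  induction ls with
  | nil => simp [pvEntriesOf, pvFlushA]
  | cons l ls ih =>
    rw [List.foldr_cons, ih]
    by_cases h : pvHdr l
    · simp only [pvStepB, h, if_true, List.reverse_reverse]
      rw [pvEntriesOf_dropWhile ls]
      simp [pvEntriesOf, h, pvEntriesOf_some, pvFlushA]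
    · simp only [pvStepB, h, Bool.false_eq_true, if_false, List.takeWhile_cons,
        Bool.not_false]
      rw [Prod.mk.injEq]
      constructor
      · simp only [pvEntriesOf, if_neg h]
        rw [pvEntriesOf_none ls ([] ++ [l])]
      · simp

-- A's and B's per-entry conversions agree entry-wise, hence on the whole entry list
theorem pvFlatAB (qs : String) (E : List (String × String)) :
    E.flatMap (fun e => pvConvA qs e.1 e.2) = E.flatMap (fun e => pvConvB (PySem.Str.upper qs) e.1 e.2) :=
  List.flatMap_congr fun e _ => pvConvAB qs e.1 e.2

-- ===== VERDICT (by name: the statement is the Claim_ definition above) =====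
theorem convert_colabfold_msa_for_openfold3_spec : Claim_equal_convert_colabfold_msa_for_openfold3 := by
  unfold Claim_equal_convert_colabfold_msa_for_openfold3
  intro msa qs _
  unfold Spec_convert_colabfold_msa_for_openfold3
  simp only [convert_colabfold_msa_for_openfold3, convert_colabfold_msa_for_openfold3_alt]
  rw [PySem.List.foldl_append_eq_flatMap, pvFoldA_eq, pvFoldB_eq, List.nil_append, pvFlatAB]
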